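-- pv_equiv track=rewrite | github.com/sjshide/AdventOfCode | 2023/2023_12.py | sym2ct
-- ===== SOURCE A (Python) =====
-- def sym2ct(sym):
--     cts = []
--     hashCt = 0
--     noQ = 1
--     for i in range(len(sym)):
--         if sym[i]=='#':
--             hashCt+=1
--         elif sym[i]=='.':
--             if hashCt>0:
--                 cts.append(hashCt)
--             hashCt=0
--         elif sym[i]=='?':
--             noQ=0
--             break
--     if noQ and hashCt:
--         cts.append(hashCt)
--     return(tuple(cts))
-- ===== SOURCE B (Python) =====
-- def sym2ct(sym):
--     f = ''.join(c for c in sym if c in '#.?')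
--     prefix, q, _ = f.partition('?')
--     groups = [len(g) for g in prefix.split('.') if g]
--     if q and prefix.endswith('#'):
--         groups.pop()
--     return tuple(groups)
-- ===== Notes on version B (the rewrite author's own statement) =====
-- stated objective: simpler
-- what changed: Replaces A's stateful counter loop (hashCt/noQ accumulator with a break) by a declarative pipeline: filter to the three meaningful characters, partition at the first question mark, split the prefix on dots and take the piece lengths, popping the last group when the prefix ends in a hash before a question mark.
import Mathlib
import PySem

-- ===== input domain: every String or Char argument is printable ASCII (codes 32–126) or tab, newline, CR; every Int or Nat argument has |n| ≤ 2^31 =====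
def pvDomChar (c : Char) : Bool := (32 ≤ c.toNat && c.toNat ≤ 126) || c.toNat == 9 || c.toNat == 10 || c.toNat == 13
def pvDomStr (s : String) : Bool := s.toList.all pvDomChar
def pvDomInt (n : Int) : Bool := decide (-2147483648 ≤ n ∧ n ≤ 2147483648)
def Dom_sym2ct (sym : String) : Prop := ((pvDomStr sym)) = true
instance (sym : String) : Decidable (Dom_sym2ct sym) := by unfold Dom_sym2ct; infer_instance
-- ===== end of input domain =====

-- B replaces A's stateful counter loop by a filter/partition/split decomposition (objective: simpler).


-- ===== PORT A =====
-- A's for-loop over the characters; the '?' branch sets noQ=0 and breaks, so the final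
-- 'if noQ and hashCt' append happens exactly when the loop runs off the end (the [] case).
def sym2ctLoop : List Char → List Int → Int → List Int
  | [], cts, hashCt => if hashCt ≠ 0 then cts ++ [hashCt] else cts
  | c :: rest, cts, hashCt =>
    if c = '#' then sym2ctLoop rest cts (hashCt + 1)
    else if c = '.' then sym2ctLoop rest (if hashCt > 0 then cts ++ [hashCt] else cts) 0
    else if c = '?' then cts
    else sym2ctLoop rest cts hashCt

def sym2ct (sym : String) : List Int := sym2ctLoop sym.toList [] 0

-- ===== PORT B =====
-- Source B: c in '#.?'
def sym2ctSpecial (c : Char) : Bool := c == '#' || c == '.' || c == '?'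

-- Source B on the filtered character list: prefix, q, _ = f.partition('?');
-- groups = [len(g) for g in prefix.split('.') if g]; pop the last group if q and prefix ends in '#'
def sym2ctCore (f : List Char) : List Int :=
  let pre := f.takeWhile (fun c => c != '?')
  let q := f.contains '?'
  let groups := ((pre.splitOn '.').filter (fun g => !g.isEmpty)).map (fun g => (g.length : Int))
  if q && (pre.getLast? == some '#') then groups.dropLast else groups

def sym2ct_alt (sym : String) : List Int := sym2ctCore (sym.toList.filter sym2ctSpecial)

-- ===== PRECONDITION & SPEC =====
def Spec_sym2ct (sym : String) (out : List Int) : Prop := out = sym2ct_alt sym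
instance (sym : String) (out : List Int) : Decidable (Spec_sym2ct sym out) := by unfold Spec_sym2ct; infer_instance

-- ===== CLAIM (what is proved, stated in full; the proofs are below) =====
def Claim_equal_sym2ct : Prop := ∀ (sym : String), Dom_sym2ct sym → Spec_sym2ct sym (sym2ct sym)

-- ===== LEMMAS AND PROOFS =====

-- A's loop appends to cts only at the end: the accumulator factors out.
theorem sym2ctLoop_append (l : List Char) : ∀ (cts : List Int) (h : Int),
    sym2ctLoop l cts h = cts ++ sym2ctLoop l [] h := by
  induction l with
  | nil => intro cts h; simp only [sym2ctLoop]; split_ifs <;> simp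
  | cons c rest ih =>
    intro cts h
    simp only [sym2ctLoop]
    split_ifs with h1 h2 h3 h4
    · exact ih cts (h + 1)
    · rw [ih (cts ++ [h]) 0, List.nil_append, ih [h] 0]; simp
    · exact ih cts 0
    · simp
    · exact ih cts h

-- characters other than '#', '.', '?' fall through every branch of A's loop
theorem sym2ctLoop_filter (l : List Char) : ∀ (cts : List Int) (h : Int),
    sym2ctLoop l cts h = sym2ctLoop (l.filter sym2ctSpecial) cts h := by
  induction l with
  | nil => intro cts h; rfl
  | cons c rest ih =>
    intro cts h
    by_cases hs : sym2ctSpecial c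
    · rw [List.filter_cons_of_pos hs]
      simp only [sym2ctLoop]
      split_ifs <;> first | rfl | apply ih
    · rw [List.filter_cons_of_neg hs]
      have h1 : c ≠ '#' := by intro e; subst e; exact hs (by decide)
      have h2 : c ≠ '.' := by intro e; subst e; exact hs (by decide)
      have h3 : c ≠ '?' := by intro e; subst e; exact hs (by decide)
      simp only [sym2ctLoop, if_neg h1, if_neg h2, if_neg h3]
      exact ih cts h

-- splitOnP on a list with no separator
theorem splitOnP_no_sep (p : Char → Bool) (l : List Char) (h : ∀ c ∈ l, p c = false) :
    List.splitOnP p l = [l] := by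
  induction l with
  | nil => simp [List.splitOnP_nil]
  | cons c rest ih =>
    rw [List.splitOnP_cons, if_neg (by simp [h c (List.mem_cons_self)]),
        ih (fun d hd => h d (List.mem_cons_of_mem _ hd))]
    rfl

-- splitOnP splits off a separator-free prefix at the first separator
theorem splitOnP_pre_sep (p : Char → Bool) (pre rest : List Char) (hsep : p '.' = true)
    (h : ∀ c ∈ pre, p c = false) :
    List.splitOnP p (pre ++ '.' :: rest) = pre :: List.splitOnP p rest := by
  induction pre with
  | nil => simp [List.splitOnP_cons, hsep]
  | cons c cs ih =>
    rw [List.cons_append, List.splitOnP_cons, if_neg (by simp [h c (List.mem_cons_self)]),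
        ih (fun d hd => h d (List.mem_cons_of_mem _ hd))]
    rfl

-- a list ending in a non-separator produces at least one non-empty piece
theorem splitOnP_filter_ne_nil (p : Char → Bool) (l : List Char) (c : Char)
    (hl : l.getLast? = some c) (hc : p c = false) :
    (List.splitOnP p l).filter (fun g => !g.isEmpty) ≠ [] := by
  induction l with
  | nil => simp at hl
  | cons a rest ih =>
    cases rest with
    | nil =>
      simp at hl; subst hl
      rw [List.splitOnP_cons, if_neg (by simp [hc]), List.splitOnP_nil]
      simp
    | cons b rs =>
      rw [List.getLast?_cons_cons] at hl
      have hne := ih hl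
      rw [List.splitOnP_cons]
      split_ifs with ha
      · simpa using hne
      · obtain ⟨s0, S, hS⟩ := List.exists_cons_of_ne_nil (List.splitOnP_ne_nil p (b :: rs))
        rw [hS]; rw [hS] at hne
        simp only [List.modifyHead_cons, List.filter_cons]
        simp

-- replicate absorbs a matching head
theorem replicate_absorb (k : ℕ) (r : List Char) :
    List.replicate k '#' ++ '#' :: r = List.replicate (k + 1) '#' ++ r := by
  rw [List.replicate_succ']; simp

-- evaluation of B's core on a block of '#'s alone
theorem core_replicate (k : ℕ) :
    sym2ctCore (List.replicate k '#') = if k = 0 then [] else [(k : Int)] := by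
  dsimp only [sym2ctCore]
  have hsplit : (List.replicate k '#').splitOn '.' = [List.replicate k '#'] := by
    rw [List.splitOn]
    exact splitOnP_no_sep _ _ (fun c hc => by
      have := List.eq_of_mem_replicate hc; simp [this])
  rcases Nat.eq_zero_or_pos k with h | h
  · subst h; simp
  · simp [hsplit, List.getLast?_replicate, Nat.pos_iff_ne_zero.mp h]

theorem core_dot (k : ℕ) (r : List Char) :
    sym2ctCore (List.replicate k '#' ++ '.' :: r)
      = (if k = 0 then [] else [(k : Int)]) ++ sym2ctCore r := by
  dsimp only [sym2ctCore]
  have htw : (List.replicate k '#' ++ '.' :: r).takeWhile (fun c => c != '?')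
      = List.replicate k '#' ++ '.' :: r.takeWhile (fun c => c != '?') := by
    rw [List.takeWhile_append]
    simp
  have hq : (List.replicate k '#' ++ '.' :: r).contains '?' = r.contains '?' := by
    simp
  have hsplit : (List.replicate k '#' ++ '.' :: (r.takeWhile (fun c => c != '?'))).splitOn '.'
      = List.replicate k '#' :: (r.takeWhile (fun c => c != '?')).splitOn '.' := by
    rw [List.splitOn, List.splitOn]
    exact splitOnP_pre_sep _ _ _ (by decide) (fun c hc => by
      have := List.eq_of_mem_replicate hc; simp [this])
  have hlast : (List.replicate k '#' ++ '.' :: (r.takeWhile (fun c => c != '?'))).getLast?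
      = ('.' :: (r.takeWhile (fun c => c != '?'))).getLast? :=
    List.getLast?_append_of_ne_nil _ (by simp)
  have hcond : (('.' :: (r.takeWhile (fun c => c != '?'))).getLast? == some '#')
      = ((r.takeWhile (fun c => c != '?')).getLast? == some '#') := by
    cases r.takeWhile (fun c => c != '?') with
    | nil => decide
    | cons a l => rw [List.getLast?_cons_cons]
  rw [htw, hq, hsplit, hlast, hcond]
  have hgroups : ((List.replicate k '#' :: ((r.takeWhile (fun c => c != '?')).splitOn '.')).filter
        (fun g => !g.isEmpty)).map (fun g => (g.length : Int))
      = (if k = 0 then [] else [(k : Int)]) ++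
        (((r.takeWhile (fun c => c != '?')).splitOn '.').filter
          (fun g => !g.isEmpty)).map (fun g => (g.length : Int)) := by
    rcases Nat.eq_zero_or_pos k with h | h
    · subst h; simp
    · simp [Nat.pos_iff_ne_zero.mp h]
  rw [hgroups]
  by_cases hc : (r.contains '?' && ((r.takeWhile (fun c => c != '?')).getLast? == some '#')) = true
  · rw [if_pos hc, if_pos hc]
    have hlastp : (r.takeWhile (fun c => c != '?')).getLast? = some '#' := by
      have := (Bool.and_eq_true _ _).mp hc |>.2
      exact beq_iff_eq.mp this
    have hne : ((((r.takeWhile (fun c => c != '?')).splitOn '.').filter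
        (fun g => !g.isEmpty)).map (fun g => (g.length : Int))) ≠ [] := by
      intro h
      exact splitOnP_filter_ne_nil (fun x => x == '.') _ '#' hlastp (by decide)
        (by rw [List.splitOn] at h; exact List.map_eq_nil_iff.mp h)
    rw [List.dropLast_append_of_ne_nil hne]
  · rw [if_neg hc, if_neg hc]

theorem core_qmark (k : ℕ) (r : List Char) :
    sym2ctCore (List.replicate k '#' ++ '?' :: r) = [] := by
  dsimp only [sym2ctCore]
  have htw : (List.replicate k '#' ++ '?' :: r).takeWhile (fun c => c != '?')
      = List.replicate k '#' := by
    rw [List.takeWhile_append]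
    simp
  have hq : (List.replicate k '#' ++ '?' :: r).contains '?' = true := by
    simp
  have hsplit : (List.replicate k '#').splitOn '.' = [List.replicate k '#'] := by
    rw [List.splitOn]
    exact splitOnP_no_sep _ _ (fun c hc => by
      have := List.eq_of_mem_replicate hc; simp [this])
  rw [htw, hq, hsplit]
  rcases Nat.eq_zero_or_pos k with h | h
  · subst h; simp
  · simp [List.getLast?_replicate, Nat.pos_iff_ne_zero.mp h]

-- main invariant: A's loop with pending count k equals B's core with k '#'s prepended
theorem loop_eq_core (l : List Char) (hl : ∀ c ∈ l, sym2ctSpecial c = true) (k : ℕ) :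
    sym2ctLoop l [] (k : Int) = sym2ctCore (List.replicate k '#' ++ l) := by
  induction l generalizing k with
  | nil =>
    rw [List.append_nil, core_replicate]
    simp only [sym2ctLoop]
    rcases Nat.eq_zero_or_pos k with h | h
    · subst h; simp
    · simp [Nat.pos_iff_ne_zero.mp h]
  | cons c rest ih =>
    have hc := hl c List.mem_cons_self
    have hrest : ∀ d ∈ rest, sym2ctSpecial d = true :=
      fun d hd => hl d (List.mem_cons_of_mem _ hd)
    simp only [sym2ctSpecial, Bool.or_eq_true, beq_iff_eq] at hc
    rcases hc with (hc | hc) | hc <;> subst hc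
    · simp only [sym2ctLoop]
      norm_num
      rw [replicate_absorb, show (k : Int) + 1 = ((k + 1 : ℕ) : Int) by push_cast; ring]
      exact ih hrest (k + 1)
    · simp only [sym2ctLoop]
      norm_num
      rw [if_neg (by decide), sym2ctLoop_append,
        show sym2ctLoop rest [] 0 = sym2ctLoop rest [] ((0 : ℕ) : Int) by norm_num,
        ih hrest 0, List.replicate_zero, List.nil_append, core_dot]
      rcases Nat.eq_zero_or_pos k with h | h
      · subst h; simp
      · simp [h, Nat.pos_iff_ne_zero.mp h]
    · simp only [sym2ctLoop]
      norm_num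
      rw [if_neg (by decide), if_neg (by decide), core_qmark]

-- ===== VERDICT (by name: the statement is the Claim_ definition above) =====
theorem sym2ct_spec : Claim_equal_sym2ct := by
  intro sym _
  unfold Spec_sym2ct sym2ct sym2ct_alt
  rw [sym2ctLoop_filter]
  have := loop_eq_core (sym.toList.filter sym2ctSpecial)
    (fun c hc => List.of_mem_filter hc) 0
  simpa using this
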